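-- pv_equiv track=rewrite | github.com/aitakaitov/tsd-2022-attributions | train_news_kfold.py | get_fold_sizes
-- ===== SOURCE A (Python) =====
-- def get_fold_sizes(dataset_length, fold_count=5):
--     fold_sizes = []
--     remaining = dataset_length
--     for k in range(fold_count):
--         if k < fold_count - 1:
--             fold_sizes.append(int(dataset_length / fold_count))
--             remaining -= int(dataset_length / fold_count)
--         else:
--             fold_sizes.append(remaining)
--     return fold_sizes
-- ===== SOURCE B (Python) =====
-- def get_fold_sizes(dataset_length, fold_count=5):
--     # Closed form instead of the accumulation loop (return value only).
--     if fold_count <= 0: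
--         return []
--     q = int(dataset_length / fold_count)
--     return [q] * (fold_count - 1) + [dataset_length - q * (fold_count - 1)]
-- ===== Notes on version B (the rewrite author's own statement) =====
-- stated objective: simpler
-- what changed: Replaces the k-indexed accumulation loop (one division and one append per iteration) with a closed form: one truncating division q, then [q]*(fold_count-1) plus the remainder dataset_length - q*(fold_count-1).
import Mathlib
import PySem

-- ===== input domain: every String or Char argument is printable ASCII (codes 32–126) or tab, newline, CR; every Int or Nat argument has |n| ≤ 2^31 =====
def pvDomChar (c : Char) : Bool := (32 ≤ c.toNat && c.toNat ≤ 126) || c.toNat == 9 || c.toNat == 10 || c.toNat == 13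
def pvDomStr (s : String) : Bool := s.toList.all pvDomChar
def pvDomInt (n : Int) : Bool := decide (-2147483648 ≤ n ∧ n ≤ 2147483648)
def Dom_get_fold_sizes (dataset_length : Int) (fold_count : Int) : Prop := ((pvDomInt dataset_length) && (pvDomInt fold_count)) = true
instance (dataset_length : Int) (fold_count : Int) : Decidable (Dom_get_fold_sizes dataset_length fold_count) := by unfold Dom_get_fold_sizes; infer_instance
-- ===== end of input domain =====

-- B replaces A's accumulation loop with a closed form (one division, replicate + remainder); objective: simpler.

-- ===== PORT A =====
-- int(dataset_length / fold_count) is truncating division; PySem.Int.truncdiv is exact for |args| < 2^53.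
def get_fold_sizes (dataset_length : Int) (fold_count : Int) : List Int :=
  ((PySem.List.pyRange 0 fold_count 1).foldl
    (fun (st : List Int × Int) (k : Int) =>
      if k < fold_count - 1 then
        (st.1 ++ [PySem.Int.truncdiv dataset_length fold_count],
         st.2 - PySem.Int.truncdiv dataset_length fold_count)
      else
        (st.1 ++ [st.2], st.2))
    ([], dataset_length)).1

-- ===== PORT B =====
def get_fold_sizes_alt (dataset_length : Int) (fold_count : Int) : List Int :=
  if fold_count ≤ 0 then []
  else
    let q := PySem.Int.truncdiv dataset_length fold_count
    List.replicate (fold_count - 1).toNat q ++ [dataset_length - q * (fold_count - 1)]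

-- ===== PRECONDITION & SPEC =====
def Spec_get_fold_sizes (dataset_length : Int) (fold_count : Int) (out : List Int) : Prop := out = get_fold_sizes_alt dataset_length fold_count
instance (dataset_length : Int) (fold_count : Int) (out : List Int) : Decidable (Spec_get_fold_sizes dataset_length fold_count out) := by unfold Spec_get_fold_sizes; infer_instance

-- ===== CLAIM (what is proved, stated in full; the proofs are below) =====
def Claim_equal_get_fold_sizes : Prop := ∀ (dataset_length : Int) (fold_count : Int), Dom_get_fold_sizes dataset_length fold_count → Spec_get_fold_sizes dataset_length fold_count (get_fold_sizes dataset_length fold_count)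

-- ===== LEMMAS AND PROOFS =====

-- Invariant of A's loop over the first m iterations (all with k < fold_count - 1):
-- the accumulator gains m copies of q and `remaining` drops by m*q.
theorem get_fold_sizes_loop_inv (dataset_length fold_count : Int) (m : Nat)
    (hm : (m : Int) ≤ fold_count - 1) (acc : List Int) (rem : Int) :
    (PySem.List.pyRange 0 m 1).foldl
      (fun (st : List Int × Int) (k : Int) =>
        if k < fold_count - 1 then
          (st.1 ++ [PySem.Int.truncdiv dataset_length fold_count],
           st.2 - PySem.Int.truncdiv dataset_length fold_count)
        else
          (st.1 ++ [st.2], st.2))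
      (acc, rem)
    = (acc ++ List.replicate m (PySem.Int.truncdiv dataset_length fold_count),
       rem - m * PySem.Int.truncdiv dataset_length fold_count) := by
  induction m generalizing acc rem with
  | zero => simp [PySem.List.pyRange_one_eq_nil]
  | succ n ih =>
    have h0 : (0 : Int) ≤ (n : Int) := by positivity
    have hsplit : PySem.List.pyRange 0 ((n : Int) + 1) 1
        = PySem.List.pyRange 0 (n : Int) 1 ++ [(n : Int)] :=
      PySem.List.pyRange_one_succ_right h0
    have hlt : (n : Int) < fold_count - 1 := by push_cast at hm; omega
    rw [show ((↑(n + 1) : Int)) = (n : Int) + 1 by omega, hsplit,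
      List.foldl_append, ih (by push_cast at hm ⊢; omega)]
    simp [hlt, List.replicate_succ']
    push_cast
    ring

theorem get_fold_sizes_eq (dataset_length fold_count : Int) :
    get_fold_sizes dataset_length fold_count = get_fold_sizes_alt dataset_length fold_count := by
  unfold get_fold_sizes get_fold_sizes_alt
  by_cases hfc : fold_count ≤ 0
  · simp [hfc, PySem.List.pyRange_one_eq_nil hfc]
  · rw [not_le] at hfc
    have h1 : (0 : Int) ≤ fold_count - 1 := by omega
    have hsplit : PySem.List.pyRange 0 fold_count 1
        = PySem.List.pyRange 0 (fold_count - 1) 1 ++ [fold_count - 1] := by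
      have := PySem.List.pyRange_one_succ_right (a := 0) (b := fold_count - 1) h1
      simpa using this
    have hcast : ((fold_count - 1).toNat : Int) = fold_count - 1 := Int.toNat_of_nonneg h1
    rw [hsplit, List.foldl_append,
      show PySem.List.pyRange 0 (fold_count - 1) 1
          = PySem.List.pyRange 0 ((fold_count - 1).toNat : Int) 1 by rw [hcast],
      get_fold_sizes_loop_inv dataset_length fold_count (fold_count - 1).toNat
        (by rw [hcast]) [] dataset_length]
    simp [not_le.mpr hfc]
    rw [show ((fold_count.toNat - 1 : Nat) : Int) = fold_count - 1 by omega]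
    ring

-- ===== VERDICT (by name: the statement is the Claim_ definition above) =====
theorem get_fold_sizes_spec : Claim_equal_get_fold_sizes := by
  intro d f _
  exact get_fold_sizes_eq d f
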